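-- pv_equiv track=rewrite | github.com/arturfarriols/Toro-BitsxlaMarato-2023 | src/core/cardiac_frequency.py | divide_into_contiguous_subdictionaries
-- ===== SOURCE A (Python) =====
-- def divide_into_contiguous_subdictionaries(dictionary, max_gap=1):
--     if not dictionary:
--         return []
--
--     sorted_keys = sorted(dictionary.keys())
--     subdictionaries = []
--
--     current_subdict = {sorted_keys[0]: dictionary[sorted_keys[0]]}
--     previous_key = sorted_keys[0]
--     for key in sorted_keys[1:]:
--         if key - max_gap > previous_key:
--             subdictionaries.append(current_subdict)
--             current_subdict = {key: dictionary[key]}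
--         else:
--             current_subdict[key] = dictionary[key]
--         previous_key = key
--
--     subdictionaries.append(current_subdict)
--     return subdictionaries
-- ===== SOURCE B (Python) =====
-- def _first_cut(keys, max_gap):
--     """Index of the first over-gap boundary in the sorted key list, or len(keys)."""
--     for i in range(1, len(keys)):
--         if keys[i] - keys[i - 1] > max_gap:
--             return i
--     return len(keys)
--
-- def _split(keys, max_gap):
--     """Recursively cut the sorted key list at its first over-gap boundary."""
--     if not keys:
--         return []
--     i = _first_cut(keys, max_gap)
--     return [keys[:i]] + _split(keys[i:], max_gap)
--
-- def divide_into_contiguous_subdictionaries(dictionary, max_gap=1):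
--     return [{k: dictionary[k] for k in g}
--             for g in _split(sorted(dictionary), max_gap)]
-- ===== Notes on version B (the rewrite author's own statement) =====
-- stated objective: alternative
-- what changed: B replaces A's single forward accumulator pass (mutable current subdict + previous key, flushed at each gap) by a recursive divide-and-slice decomposition: a helper finds the first over-gap boundary in the sorted key list, the list is sliced there and the tail is split recursively, then each key slice is materialized into a subdictionary.
import Mathlib
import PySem

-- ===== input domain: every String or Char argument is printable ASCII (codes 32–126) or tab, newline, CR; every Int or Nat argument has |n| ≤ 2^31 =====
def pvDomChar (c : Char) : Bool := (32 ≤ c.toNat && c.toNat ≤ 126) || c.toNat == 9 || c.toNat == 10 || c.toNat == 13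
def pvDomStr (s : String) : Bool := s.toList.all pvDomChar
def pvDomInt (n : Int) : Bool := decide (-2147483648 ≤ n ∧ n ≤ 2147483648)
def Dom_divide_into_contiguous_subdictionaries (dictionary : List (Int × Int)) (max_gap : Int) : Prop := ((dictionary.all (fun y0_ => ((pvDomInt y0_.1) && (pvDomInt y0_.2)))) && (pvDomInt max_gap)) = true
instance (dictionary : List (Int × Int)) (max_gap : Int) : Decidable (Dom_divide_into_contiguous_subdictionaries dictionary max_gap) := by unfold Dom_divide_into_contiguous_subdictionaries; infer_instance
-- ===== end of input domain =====

-- B replaces A's single forward accumulator pass by a recursive split-at-first-gap on the sorted key list (alternative decomposition, same cost); equivalence of return values proved below.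


-- ===== PORT A =====
-- dictionary[key] is ported as getD … 0: every looked-up key is a key of the dict, so the default is never reached
def pvStepA (d : PySem.Dict Int Int) (max_gap : Int)
    (st : List (PySem.Dict Int Int) × PySem.Dict Int Int × Int) (key : Int) :
    List (PySem.Dict Int Int) × PySem.Dict Int Int × Int :=
  if key - max_gap > st.2.2 then
    (st.1 ++ [st.2.1], (PySem.Dict.empty).insert key (d.getD key 0), key)
  else
    (st.1, st.2.1.insert key (d.getD key 0), key)

def divide_into_contiguous_subdictionaries (dictionary : List (Int × Int)) (max_gap : Int) : List (List (Int × Int)) :=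
  let d := PySem.Dict.ofList dictionary
  if d.items.isEmpty then []
  else
    match PySem.List.sorted d.keys (fun k => k) false with
    | [] => []   -- unreachable: the dict is nonempty
    | k0 :: rest =>
      let fin := rest.foldl (pvStepA d max_gap) ([], (PySem.Dict.empty).insert k0 (d.getD k0 0), k0)
      (fin.1 ++ [fin.2.1]).map (fun s => s.items)

-- ===== PORT B =====
-- _first_cut: for i in range(1, len(keys)): first i with keys[i] - keys[i-1] > max_gap, else len(keys)
-- (the indices visited are in range, so keys[i] is ported with pyGetD … 0; the default is never reached)
def pvFirstCut (keys : List Int) (max_gap : Int) : Int :=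
  match (PySem.List.pyRange 1 keys.length 1).find?
      (fun i => decide (PySem.List.pyGetD keys i 0 - PySem.List.pyGetD keys (i-1) 0 > max_gap)) with
  | some i => i
  | none => keys.length

-- the cut index is ≥ 1 on a nonempty list (used only for termination of pvSplit)
lemma pvFirstCut_ge_one (keys : List Int) (max_gap : Int) (h : keys ≠ []) :
    1 ≤ pvFirstCut keys max_gap := by
  unfold pvFirstCut
  cases hf : (PySem.List.pyRange 1 keys.length 1).find?
      (fun i => decide (PySem.List.pyGetD keys i 0 - PySem.List.pyGetD keys (i-1) 0 > max_gap)) with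
  | none =>
    have : 1 ≤ keys.length := List.length_pos_of_ne_nil h
    simp; omega
  | some i =>
    have := PySem.List.mem_pyRange_one.mp (List.mem_of_find?_eq_some hf)
    simpa using this.1

-- _split: cut the list at its first over-gap boundary and recurse on the remainder
def pvSplit (keys : List Int) (max_gap : Int) : List (List Int) :=
  if _h : keys = [] then []
  else
    PySem.List.slice keys none (some (pvFirstCut keys max_gap)) ::
      pvSplit (PySem.List.slice keys (some (pvFirstCut keys max_gap)) none) max_gap
termination_by keys.length
decreasing_by
  have hb := pvFirstCut_ge_one keys max_gap _h
  rw [PySem.List.slice_from _ (by omega)]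
  have hl : 1 ≤ keys.length := List.length_pos_of_ne_nil _h
  simp [List.length_drop]
  omega

def divide_into_contiguous_subdictionaries_alt (dictionary : List (Int × Int)) (max_gap : Int) : List (List (Int × Int)) :=
  let d := PySem.Dict.ofList dictionary
  (pvSplit (PySem.List.sorted d.keys (fun k => k) false) max_gap).map
    (fun g => g.map (fun k => (k, d.getD k 0)))

-- ===== PRECONDITION & SPEC =====
def Spec_divide_into_contiguous_subdictionaries (dictionary : List (Int × Int)) (max_gap : Int) (out : List (List (Int × Int))) : Prop := out = divide_into_contiguous_subdictionaries_alt dictionary max_gap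
instance (dictionary : List (Int × Int)) (max_gap : Int) (out : List (List (Int × Int))) : Decidable (Spec_divide_into_contiguous_subdictionaries dictionary max_gap out) := by unfold Spec_divide_into_contiguous_subdictionaries; infer_instance

-- ===== CLAIM (what is proved, stated in full; the proofs are below) =====
def Claim_equal_divide_into_contiguous_subdictionaries : Prop := ∀ (dictionary : List (Int × Int)) (max_gap : Int), Dom_divide_into_contiguous_subdictionaries dictionary max_gap → Spec_divide_into_contiguous_subdictionaries dictionary max_gap (divide_into_contiguous_subdictionaries dictionary max_gap)

-- ===== LEMMAS AND PROOFS =====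

-- key groups of a list relative to a previous key: .1 = keys joined to the current group, .2 = the later groups
def pvGrpFrom (gap : Int) : Int → List Int → List Int × List (List Int)
  | _, [] => ([], [])
  | prev, k :: rest =>
    let p := pvGrpFrom gap k rest
    if k - gap > prev then ([], (k :: p.1) :: p.2) else (k :: p.1, p.2)

lemma pvGetD_cons_succ (x : Int) (xs : List Int) (i d : Int) (h0 : 0 ≤ i) (h1 : i < xs.length) :
    PySem.List.pyGetD (x :: xs) (i + 1) d = PySem.List.pyGetD xs i d := by
  rw [PySem.List.pyGetD_eq_getElem (x :: xs) d (by omega) (by simp; omega),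
      PySem.List.pyGetD_eq_getElem xs d h0 (by omega)]
  have : (i + 1).toNat = i.toNat + 1 := by omega
  simp [this]

lemma pvFind?_pyRange_shift (p q : Int → Bool) :
    ∀ (m : Nat) (a n : Int), n - a = m → (∀ i, a ≤ i → i < n → p (i + 1) = q i) →
    (PySem.List.pyRange (a + 1) (n + 1) 1).find? p = ((PySem.List.pyRange a n 1).find? q).map (· + 1) := by
  intro m
  induction m with
  | zero =>
    intro a n hm _
    rw [PySem.List.pyRange_one_eq_nil (by omega), PySem.List.pyRange_one_eq_nil (by omega)]
    simp
  | succ m' ih =>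
    intro a n hm hpq
    rw [PySem.List.pyRange_one_cons (by omega : a < n), PySem.List.pyRange_one_cons (by omega : a + 1 < n + 1)]
    simp only [List.find?_cons]
    rw [hpq a (le_refl a) (by omega)]
    cases hq : q a with
    | true => simp
    | false =>
      simp only
      have := ih (a + 1) n (by omega) (fun i h1 h2 => hpq i (by omega) h2)
      rw [show a + 1 + 1 = (a + 1) + 1 by ring] at this
      exact this

lemma pvFirstCut_two_cut (k0 k1 : Int) (rest : List Int) (gap : Int) (h : k1 - gap > k0) :
    pvFirstCut (k0 :: k1 :: rest) gap = 1 := by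
  unfold pvFirstCut
  rw [PySem.List.pyRange_one_cons (by simp)]
  have h1 : PySem.List.pyGetD (k0 :: k1 :: rest) (1 : Int) 0 = k1 := by
    rw [@PySem.List.pyGetD_eq_getElem Int (k0 :: k1 :: rest) 1 0 (by omega) (by simp)]
    rfl
  have h0 : PySem.List.pyGetD (k0 :: k1 :: rest) ((1 : Int) - 1) 0 = k0 := by
    norm_num [PySem.List.pyGetD_zero_cons]
  simp only [List.find?_cons, h1, h0]
  have : decide (k1 - k0 > gap) = true := by simp; omega
  simp [this]

lemma pvFirstCut_two_nocut (k0 k1 : Int) (rest : List Int) (gap : Int) (h : ¬ k1 - gap > k0) :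
    pvFirstCut (k0 :: k1 :: rest) gap = pvFirstCut (k1 :: rest) gap + 1 := by
  unfold pvFirstCut
  have hlen : ((k0 :: k1 :: rest).length : Int) = ((k1 :: rest).length : Int) + 1 := by simp
  rw [hlen, PySem.List.pyRange_one_cons (by simp)]
  have h1 : PySem.List.pyGetD (k0 :: k1 :: rest) (1 : Int) 0 = k1 := by
    rw [@PySem.List.pyGetD_eq_getElem Int (k0 :: k1 :: rest) 1 0 (by omega) (by simp)]
    rfl
  have h0 : PySem.List.pyGetD (k0 :: k1 :: rest) ((1 : Int) - 1) 0 = k0 := by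
    norm_num [PySem.List.pyGetD_zero_cons]
  simp only [List.find?_cons, h1, h0]
  have hfalse : decide (k1 - k0 > gap) = false := by simp; omega
  simp only [hfalse]
  have hshift := pvFind?_pyRange_shift
      (fun i => decide (PySem.List.pyGetD (k0 :: k1 :: rest) i 0 - PySem.List.pyGetD (k0 :: k1 :: rest) (i - 1) 0 > gap))
      (fun i => decide (PySem.List.pyGetD (k1 :: rest) i 0 - PySem.List.pyGetD (k1 :: rest) (i - 1) 0 > gap))
      ((k1 :: rest).length - 1) 1 ((k1 :: rest).length : Int) (by simp) ?_
  · rw [hshift]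
    cases hq : ((PySem.List.pyRange 1 ((k1 :: rest).length : Int) 1).find?
        (fun i => decide (PySem.List.pyGetD (k1 :: rest) i 0 - PySem.List.pyGetD (k1 :: rest) (i - 1) 0 > gap))) with
    | none => simp
    | some j => simp
  · intro i hi1 hi2
    have e1 : PySem.List.pyGetD (k0 :: k1 :: rest) (i + 1) 0 = PySem.List.pyGetD (k1 :: rest) i 0 :=
      pvGetD_cons_succ _ _ _ _ (by omega) (by simp at hi2 ⊢; omega)
    have e2 : PySem.List.pyGetD (k0 :: k1 :: rest) (i + 1 - 1) 0 = PySem.List.pyGetD (k1 :: rest) (i - 1) 0 := by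
      rw [show i + 1 - 1 = (i - 1) + 1 by ring]
      exact pvGetD_cons_succ _ _ _ _ (by omega) (by simp at hi2 ⊢; omega)
    simp only [e1, e2]

-- B's recursive split computes exactly the grouping pvGrpFrom describes
lemma pvSplit_eq (gap : Int) : ∀ (rest : List Int) (k0 : Int),
    pvSplit (k0 :: rest) gap = (k0 :: (pvGrpFrom gap k0 rest).1) :: (pvGrpFrom gap k0 rest).2 := by
  intro rest
  induction rest with
  | nil =>
    intro k0
    rw [pvSplit]
    have hc : pvFirstCut [k0] gap = 1 := by
      unfold pvFirstCut
      rw [show (([k0] : List Int).length : Int) = 1 by simp, PySem.List.pyRange_one_eq_nil (by omega)]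
      simp
    rw [hc, pvSplit]
    simp [pvGrpFrom, PySem.List.slice_to _ (by omega : (0:Int) ≤ 1), PySem.List.slice_from _ (by omega : (0:Int) ≤ 1)]
  | cons k1 rest' ih =>
    intro k0
    by_cases h : k1 - gap > k0
    · rw [pvSplit]
      rw [dif_neg (by simp), pvFirstCut_two_cut k0 k1 rest' gap h]
      rw [PySem.List.slice_to _ (by omega : (0:Int) ≤ 1), PySem.List.slice_from _ (by omega : (0:Int) ≤ 1)]
      simp only [Int.toNat_one, List.take_succ_cons, List.take_zero, List.drop_succ_cons, List.drop_zero]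
      rw [ih k1]
      simp [pvGrpFrom, h]
    · have hge := pvFirstCut_ge_one (k1 :: rest') gap (by simp)
      rw [pvSplit]
      rw [dif_neg (by simp), pvFirstCut_two_nocut k0 k1 rest' gap h]
      have hiter := ih k1
      rw [pvSplit, dif_neg (by simp)] at hiter
      have htake : PySem.List.slice (k0 :: k1 :: rest') none (some (pvFirstCut (k1 :: rest') gap + 1)) =
          k0 :: PySem.List.slice (k1 :: rest') none (some (pvFirstCut (k1 :: rest') gap)) := by
        rw [PySem.List.slice_to _ (by omega), PySem.List.slice_to _ (by omega)]
        have : (pvFirstCut (k1 :: rest') gap + 1).toNat = (pvFirstCut (k1 :: rest') gap).toNat + 1 := by omega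
        simp [this]
      have hdrop : PySem.List.slice (k0 :: k1 :: rest') (some (pvFirstCut (k1 :: rest') gap + 1)) none =
          PySem.List.slice (k1 :: rest') (some (pvFirstCut (k1 :: rest') gap)) none := by
        rw [PySem.List.slice_from _ (by omega), PySem.List.slice_from _ (by omega)]
        have : (pvFirstCut (k1 :: rest') gap + 1).toNat = (pvFirstCut (k1 :: rest') gap).toNat + 1 := by omega
        simp [this]
      rw [htake, hdrop]
      have h1 := (List.cons.injEq _ _ _ _).mp hiter
      rw [h1.1, h1.2]
      simp [pvGrpFrom, h]

-- A's fold over the tail of the sorted keys produces the same groups, materialized as dicts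
lemma pv_A_foldl (d : PySem.Dict Int Int) (gap : Int) :
    ∀ (l : List Int) (subs : List (PySem.Dict Int Int)) (cur : PySem.Dict Int Int) (prev : Int),
    l.Pairwise (· < ·) → (∀ x ∈ l, x ∉ cur.keys) →
    (let fin := l.foldl (pvStepA d gap) (subs, cur, prev)
     (fin.1 ++ [fin.2.1]).map (fun s => s.items)) =
      subs.map (fun s => s.items)
        ++ (cur.items ++ (pvGrpFrom gap prev l).1.map (fun k => (k, d.getD k 0)))
        :: (pvGrpFrom gap prev l).2.map (fun g => g.map (fun k => (k, d.getD k 0))) := by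
  intro l
  induction l with
  | nil => intro subs cur prev _ _; simp [pvGrpFrom]
  | cons k rest ih =>
    intro subs cur prev hpw hfresh
    have hpw' : rest.Pairwise (· < ·) := (List.pairwise_cons.mp hpw).2
    have hlt : ∀ x ∈ rest, k < x := (List.pairwise_cons.mp hpw).1
    have hkcur : k ∉ cur.keys := hfresh k (by simp)
    by_cases h : k - gap > prev
    · have hstep : (k :: rest).foldl (pvStepA d gap) (subs, cur, prev) =
          rest.foldl (pvStepA d gap)
            (subs ++ [cur], (PySem.Dict.empty).insert k (d.getD k 0), k) := by
        simp [List.foldl_cons, pvStepA, h]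
      rw [hstep, ih (subs ++ [cur]) _ k hpw'
          (by intro x hx
              have := hlt x hx
              simp [PySem.Dict.mem_keys_insert, PySem.Dict.keys_empty]
              omega)]
      have hitems : ((PySem.Dict.empty).insert k (d.getD k 0)).items = [(k, d.getD k 0)] := by
        rw [PySem.Dict.items_insert_of_not_contains _ _ (by simp)]
        simp [PySem.Dict.empty]
      simp [pvGrpFrom, h, hitems]
    · have hstep : (k :: rest).foldl (pvStepA d gap) (subs, cur, prev) =
          rest.foldl (pvStepA d gap) (subs, cur.insert k (d.getD k 0), k) := by
        simp [List.foldl_cons, pvStepA, h]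
      have hnc : cur.contains k = false := by
        by_contra hc
        exact hkcur ((PySem.Dict.contains_iff_mem_keys _ _).mp (Bool.of_not_eq_false hc))
      rw [hstep, ih subs _ k hpw'
          (by intro x hx
              have := hlt x hx
              rw [PySem.Dict.mem_keys_insert]
              push Not
              exact ⟨by omega, hfresh x (by simp [hx])⟩)]
      have hitems : (cur.insert k (d.getD k 0)).items = cur.items ++ [(k, d.getD k 0)] :=
        PySem.Dict.items_insert_of_not_contains _ _ hnc
      simp [pvGrpFrom, h, hitems]

-- ===== VERDICT (by name: the statement is the Claim_ definition above) =====
theorem divide_into_contiguous_subdictionaries_spec : Claim_equal_divide_into_contiguous_subdictionaries := by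
  intro dictionary max_gap _
  unfold Spec_divide_into_contiguous_subdictionaries
  simp only [divide_into_contiguous_subdictionaries, divide_into_contiguous_subdictionaries_alt]
  set d := PySem.Dict.ofList dictionary with hd
  have hnodup : d.keys.Nodup := PySem.Dict.nodup_keys_ofList dictionary
  set ks := PySem.List.sorted d.keys (fun k => k) false with hks
  have hksnd : ks.Nodup := (PySem.List.sorted_perm d.keys (fun k => k) false).nodup_iff.mpr hnodup
  have hksle : ks.Pairwise (fun a b => a ≤ b) := PySem.List.sorted_pairwise d.keys (fun k => k)
  have hkslt : ks.Pairwise (· < ·) := by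
    have := hksle.and hksnd
    exact this.imp (fun h => lt_of_le_of_ne h.1 h.2)
  by_cases hemp : d.items.isEmpty
  · have hkeys : d.keys = [] := by
      simp only [PySem.Dict.keys]
      rw [List.isEmpty_iff.mp hemp]
      simp
    have hnil : ks = [] := by
      rw [hks, hkeys]
      rfl
    rw [hnil, pvSplit]
    simp [hemp]
  · simp only [hemp, if_false, Bool.false_eq_true]
    cases hcase : ks with
    | nil =>
      rw [hcase] at hks
      have : d.keys = [] := by
        have := PySem.List.sorted_perm d.keys (fun k => k) false
        rw [← hks] at this
        exact this.symm.eq_nil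
      simp only [PySem.Dict.keys] at this
      rw [List.map_eq_nil_iff.mp this] at hemp
      simp at hemp
    | cons k0 rest =>
      rw [hcase] at hkslt
      have hA := pv_A_foldl d max_gap rest []
        ((PySem.Dict.empty).insert k0 (d.getD k0 0)) k0
        (List.pairwise_cons.mp hkslt).2
        (by intro x hx
            have := (List.pairwise_cons.mp hkslt).1 x hx
            simp [PySem.Dict.mem_keys_insert, PySem.Dict.keys_empty]
            omega)
      simp only at hA
      rw [pvSplit_eq]
      have hitems : ((PySem.Dict.empty).insert k0 (d.getD k0 0)).items = [(k0, d.getD k0 0)] := by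
        rw [PySem.Dict.items_insert_of_not_contains _ _ (by simp)]
        simp [PySem.Dict.empty]
      exact hA.trans (by simp [hitems])
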